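-- pv_equiv track=rewrite | github.com/Yassinecoder06/ACM | Codeforces Contests/Codeforces Round 1062 (Div4)/E_khba_Loves_to_Sleep.py | solve
-- ===== SOURCE A (Python) =====
-- def can_place(friends, k, x, min_dist):
--     """Check if we can place k teleports such that all friends are within min_dist of a teleport"""
--     friends_sorted = sorted(set(friends))
--     teleports = []
--
--     for friend_pos in friends_sorted:
--         # Check if this friend is already covered by an existing teleport
--         covered = False
--         for tp in teleports:
--             if abs(friend_pos - tp) <= min_dist:
--                 covered = True
--                 break
--
--         if not covered:
--             # Place a teleport as far right as possible while covering this friend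
--             teleport_pos = friend_pos + min_dist
--             teleport_pos = min(teleport_pos, x)
--             teleports.append(teleport_pos)
--
--     if len(teleports) > k:
--         return False, []
--
--     # Pad with additional teleports at boundaries
--     if len(teleports) < k:
--         remaining = k - len(teleports)
--         # Add teleports from x down to 0, avoiding duplicates
--         for pos in range(x, -1, -1):
--             if pos not in teleports and remaining > 0:
--                 teleports.append(pos)
--                 remaining -= 1
--
--     return True, sorted(teleports)
--
-- def solve(n, k, x, friends):
--     """Find k teleport positions that maximize minimum distance"""
--     # Binary search on the answer
--     left, right = 0, x
--     best_teleports = []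
--
--     while left <= right:
--         mid = (left + right) // 2
--         can_do, teleports = can_place(friends, k, x, mid)
--
--         if can_do:
--             best_teleports = teleports
--             left = mid + 1
--         else:
--             right = mid - 1
--
--     return best_teleports
-- ===== SOURCE B (Python) =====
-- def solve(n, k, x, friends):
--     """B: binary search on the answer, but each feasibility check is linear:
--     greedy keeps a reversed teleport list and compares only its head (the last
--     placed teleport), and padding is a take of a filtered countdown with a
--     constant-time set membership test instead of A's list scan over range(x,-1,-1)."""
--     fs = sorted(set(friends))
--
--     def cover(d):
--         rev = []
--         for f in fs:
--             if not rev or f - rev[0] > d: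
--                 rev.insert(0, min(f + d, x))
--         if len(rev) > k:
--             return None
--         occ = set(rev)
--         pads = [p for p in range(x, -1, -1) if p not in occ][:k - len(rev)]
--         return sorted(rev[::-1] + pads)
--
--     def bs(lo, hi, best):
--         if lo > hi:
--             return best
--         mid = (lo + hi) // 2
--         ts = cover(mid)
--         if ts is None:
--             return bs(lo, mid - 1, best)
--         return bs(mid + 1, hi, ts)
--
--     return bs(0, x, [])
-- ===== Notes on version B (the rewrite author's own statement) =====
-- stated objective: faster
-- what changed: B sorts the distinct friends once, runs the greedy with a reversed list checking only its head (the last placed teleport) instead of scanning all teleports per friend, builds the padding as a take of a set-filtered countdown instead of A's per-position list-membership sweep, and drives the binary search by a recursive function returning None/list instead of A's while loop over a (flag, list) pair.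
import Mathlib
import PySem

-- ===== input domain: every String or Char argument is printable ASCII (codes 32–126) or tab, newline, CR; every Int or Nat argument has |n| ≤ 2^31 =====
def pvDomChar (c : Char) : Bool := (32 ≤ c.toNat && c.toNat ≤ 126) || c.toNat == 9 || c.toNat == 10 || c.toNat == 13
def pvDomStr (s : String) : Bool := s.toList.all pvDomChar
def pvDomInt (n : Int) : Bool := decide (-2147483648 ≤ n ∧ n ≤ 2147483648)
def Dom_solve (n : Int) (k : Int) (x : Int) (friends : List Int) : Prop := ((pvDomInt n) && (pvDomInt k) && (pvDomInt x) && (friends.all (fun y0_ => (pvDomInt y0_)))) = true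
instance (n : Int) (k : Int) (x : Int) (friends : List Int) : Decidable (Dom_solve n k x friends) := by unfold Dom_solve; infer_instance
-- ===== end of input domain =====

-- B replaces A's quadratic any-teleport coverage scan by a head-of-reversed-list
-- check and A's O(x·k) padding sweep by take-of-filter with a set; same return value.

-- ===== PORT A =====
-- greedy placement loop of can_place: inner 'for tp in teleports' scan with break
def greedyA (mid x : Int) (ts : List Int) : List Int → List Int
  | [] => ts
  | f :: rest =>
    if ts.any (fun tp => decide (|f - tp| ≤ mid)) then greedyA mid x ts rest
    else greedyA mid x (ts ++ [min (f + mid) x]) rest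

-- body of 'for pos in range(x, -1, -1)': state = (teleports, remaining)
def padStepA (st : List Int × Int) (pos : Int) : List Int × Int :=
  if pos ∉ st.1 ∧ st.2 > 0 then (st.1 ++ [pos], st.2 - 1) else st

def can_placeA (friends : List Int) (k x mid : Int) : Bool × List Int :=
  let fs := PySem.List.sorted (PySem.Set.ofList friends) (fun y => y) false
  let ts := greedyA mid x [] fs
  if (ts.length : Int) > k then (false, [])
  else
    let ts2 := if (ts.length : Int) < k then
        ((PySem.List.pyRange x (-1) (-1)).foldl padStepA (ts, k - (ts.length : Int))).1
      else ts
    (true, PySem.List.sorted ts2 (fun y => y) false)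

-- binary-search while loop of solve; the Nat argument is pure fuel (the interval
-- shrinks by at least 1 per iteration, so (x+1).toNat iterations always suffice)
def solveLoopA (friends : List Int) (k x : Int) : Nat → Int → Int → List Int → List Int
  | 0, _, _, best => best
  | fuel + 1, left, right, best =>
    if left ≤ right then
      let mid := PySem.Int.floordiv (left + right) 2
      let r := can_placeA friends k x mid
      if r.1 then solveLoopA friends k x fuel (mid + 1) right r.2
      else solveLoopA friends k x fuel left (mid - 1) best
    else best

def solve (n : Int) (k : Int) (x : Int) (friends : List Int) : List Int :=
  solveLoopA friends k x (x + 1).toNat 0 x []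

-- ===== PORT B =====
-- 'rev.insert(0, …)' greedy: teleports kept newest-first, only rev[0] is compared
def greedyRevB (d x : Int) (rev : List Int) : List Int → List Int
  | [] => rev
  | f :: rest =>
    match rev with
    | [] => greedyRevB d x [min (f + d) x] rest
    | l :: _ =>
      if f - l > d then greedyRevB d x (min (f + d) x :: l :: rev.tail) rest
      else greedyRevB d x (l :: rev.tail) rest

-- cover(d): None when infeasible, else the sorted teleport list;
-- pads = '[p for p in range(x,-1,-1) if p not in occ][:k-len(rev)]'
def coverB (fs : List Int) (k x d : Int) : Option (List Int) :=
  let rev := greedyRevB d x [] fs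
  if (rev.length : Int) > k then none
  else
    let occ := PySem.Set.ofList rev
    let pads := ((PySem.List.pyRange x (-1) (-1)).filter
        (fun p => decide (p ∉ occ))).take (k - (rev.length : Int)).toNat
    some (PySem.List.sorted (rev.reverse ++ pads) (fun y => y) false)

-- 'def bs(lo, hi, best)': structural recursion on the interval width
def bsB (fs : List Int) (k x lo hi : Int) (best : List Int) : List Int :=
  if h : lo > hi then best
  else
    let mid := PySem.Int.floordiv (lo + hi) 2
    match coverB fs k x mid with
    | none => bsB fs k x lo (mid - 1) best
    | some ts => bsB fs k x (mid + 1) hi ts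
termination_by (hi + 1 - lo).toNat
decreasing_by
  · have hb := PySem.Int.floordiv_two_mid_bounds (by omega : lo ≤ hi)
    omega
  · have hb := PySem.Int.floordiv_two_mid_bounds (by omega : lo ≤ hi)
    omega

def solve_alt (n : Int) (k : Int) (x : Int) (friends : List Int) : List Int :=
  bsB (PySem.List.sorted (PySem.Set.ofList friends) (fun y => y) false) k x 0 x []

-- ===== PRECONDITION & SPEC =====
def Spec_solve (n : Int) (k : Int) (x : Int) (friends : List Int) (out : List Int) : Prop := out = solve_alt n k x friends
instance (n : Int) (k : Int) (x : Int) (friends : List Int) (out : List Int) : Decidable (Spec_solve n k x friends out) := by unfold Spec_solve; infer_instance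

-- ===== CLAIM (what is proved, stated in full; the proofs are below) =====
def Claim_equal_solve : Prop := ∀ (n : Int) (k : Int) (x : Int) (friends : List Int), Dom_solve n k x friends → Spec_solve n k x friends (solve n k x friends)

-- ===== LEMMAS AND PROOFS =====

-- A's any-teleport scan equals B's head-of-rev check, given the greedy invariants.
lemma greedy_eq (d x : Int) (hd : 0 ≤ d) :
    ∀ (fs rev : List Int), fs.Pairwise (· ≤ ·) →
      (∀ tp ∈ rev, tp ≤ x) →
      (∀ tp ∈ rev, ∀ f ∈ fs, tp ≤ f + d) →
      (∀ l, rev.head? = some l → ∀ tp ∈ rev, tp ≤ l) →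
      greedyA d x rev.reverse fs = (greedyRevB d x rev fs).reverse := by
  intro fs
  induction fs with
  | nil => intro rev _ _ _ _; rfl
  | cons f rest ih =>
    intro rev hpw hx hbound hhead
    rw [List.pairwise_cons] at hpw
    obtain ⟨hf, hrest⟩ := hpw
    simp only [greedyA, greedyRevB]
    cases rev with
    | nil =>
      simp only [List.reverse_nil, List.any_nil, Bool.false_eq_true, if_false, List.nil_append]
      rw [show [min (f + d) x] = [min (f + d) x].reverse from rfl]
      refine ih [min (f + d) x] hrest ?_ ?_ ?_
      · intro tp htp; simp only [List.mem_singleton] at htp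
        subst htp; exact min_le_right _ _
      · intro tp htp f' hf'; simp only [List.mem_singleton] at htp
        subst htp
        have h1 := hf f' hf'
        have h2 := min_le_left (f + d) x
        omega
      · intro l hl tp htp
        simp only [List.head?_cons, Option.some.injEq] at hl
        simp only [List.mem_singleton] at htp
        subst hl; subst htp; exact le_rfl
    | cons l rev' =>
      have hl : l ∈ l :: rev' := List.mem_cons_self
      simp only [List.tail_cons]
      by_cases hcov : f - l ≤ d
      · have hany : (((l :: rev').reverse).any fun tp => decide (|f - tp| ≤ d)) = true := by
          refine List.any_eq_true.mpr ⟨l, by simp, ?_⟩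
          have h1 : l ≤ f + d := hbound l hl f List.mem_cons_self
          simp only [decide_eq_true_eq, abs_le]; omega
        have hpl : ¬ (d < f - l) := by omega
        simp only [hany, hpl, if_true, if_false]
        refine ih (l :: rev') hrest hx ?_ hhead
        intro tp htp f' hf'; exact hbound tp htp f' (List.mem_cons_of_mem f hf')
      · have hany : (((l :: rev').reverse).any fun tp => decide (|f - tp| ≤ d)) = false := by
          refine List.any_eq_false.mpr ?_
          intro tp htp
          rw [List.mem_reverse] at htp
          have h1 : tp ≤ l := hhead l rfl tp htp
          simp only [decide_eq_true_eq, abs_le, not_and, not_le]; omega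
        have hpl : d < f - l := by omega
        simp only [hany, hpl, Bool.false_eq_true, if_false, if_true]
        rw [show (l :: rev').reverse ++ [min (f + d) x]
              = (min (f + d) x :: l :: rev').reverse by simp]
        refine ih (min (f + d) x :: l :: rev') hrest ?_ ?_ ?_
        · intro tp htp
          rcases List.mem_cons.mp htp with h | h
          · subst h; exact min_le_right _ _
          · exact hx tp h
        · intro tp htp f' hf'
          rcases List.mem_cons.mp htp with h | h
          · subst h
            have h1 := hf f' hf'
            have h2 := min_le_left (f + d) x
            omega
          · exact hbound tp h f' (List.mem_cons_of_mem f hf')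
        · intro l' hl' tp htp
          simp only [List.head?_cons, Option.some.injEq] at hl'
          subst hl'
          rcases List.mem_cons.mp htp with h | h
          · subst h; exact le_rfl
          · have h2 : tp ≤ f + d := hbound tp h f List.mem_cons_self
            have h3 : tp ≤ x := hx tp h
            exact le_min h2 h3

-- A's countdown sweep with list-membership test equals take-of-filter over the range.
lemma pad_eq (ts0 : List Int) :
    ∀ (m : Nat) (pos : Int) (extra : List Int) (r : Int), (pos + 1).toNat ≤ m →
      (∀ e ∈ extra, pos < e) →
      ((PySem.List.pyRange pos (-1) (-1)).foldl padStepA (ts0 ++ extra, r)).1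
        = ts0 ++ extra ++ ((PySem.List.pyRange pos (-1) (-1)).filter
            (fun p => decide (p ∉ ts0))).take r.toNat := by
  intro m
  induction m with
  | zero =>
    intro pos extra r hle _
    rw [PySem.List.pyRange_neg_one_eq_nil (by omega)]
    simp
  | succ m ih =>
    intro pos extra r hle hgt
    by_cases hpos : 0 ≤ pos
    · rw [PySem.List.pyRange_neg_one_cons (by omega : (-1 : Int) < pos), List.foldl_cons,
        List.filter_cons]
      by_cases hr : r > 0
      · by_cases hmem : pos ∈ ts0
        · have hstep : padStepA (ts0 ++ extra, r) pos = (ts0 ++ extra, r) := by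
            unfold padStepA
            rw [if_neg]
            simp only [List.mem_append, not_and, not_lt]
            intro hc; exact absurd (Or.inl hmem) hc
          rw [hstep, if_neg (by simpa using hmem)]
          exact ih (pos - 1) extra r (by omega) (fun e he => by have := hgt e he; omega)
        · have hne : pos ∉ ts0 ++ extra := by
            simp only [List.mem_append, not_or]
            exact ⟨hmem, fun hc => absurd (hgt pos hc) (by omega)⟩
          have hstep : padStepA (ts0 ++ extra, r) pos = (ts0 ++ extra ++ [pos], r - 1) := by
            unfold padStepA
            rw [if_pos ⟨hne, hr⟩]
          rw [hstep, if_pos (by simpa using hmem)]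
          have htake : r.toNat = (r - 1).toNat + 1 := by omega
          rw [htake, List.take_succ_cons]
          have := ih (pos - 1) (extra ++ [pos]) (r - 1) (by omega)
            (by intro e he
                rcases List.mem_append.mp he with h | h
                · have := hgt e h; omega
                · simp only [List.mem_singleton] at h; omega)
          rw [show ts0 ++ extra ++ [pos] = ts0 ++ (extra ++ [pos]) by simp, this]
          simp
      · have hstep : padStepA (ts0 ++ extra, r) pos = (ts0 ++ extra, r) := by
          unfold padStepA
          rw [if_neg (by omega : ¬ (pos ∉ ts0 ++ extra ∧ r > 0))]
        have h0 : r.toNat = 0 := by omega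
        rw [hstep]
        have := ih (pos - 1) extra r (by omega) (fun e he => by have := hgt e he; omega)
        rw [this, h0]
        by_cases hm : pos ∉ ts0
        · rw [if_pos (by simpa using hm)]
          simp
        · rw [if_neg (by simpa using hm)]
    · rw [PySem.List.pyRange_neg_one_eq_nil (by omega)]
      simp
-- the fuel m is bookkeeping only: instantiated with m = (pos+1).toNat at use sites

lemma can_place_eq (friends : List Int) (k x d : Int) (hd : 0 ≤ d) :
    can_placeA friends k x d
      = (match coverB (PySem.List.sorted (PySem.Set.ofList friends) (fun y => y) false) k x d with
         | none => (false, [])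
         | some ts => (true, ts)) := by
  unfold can_placeA coverB
  have hg : greedyA d x []
        (PySem.List.sorted (PySem.Set.ofList friends) (fun y => y) false)
      = (greedyRevB d x []
        (PySem.List.sorted (PySem.Set.ofList friends) (fun y => y) false)).reverse := by
    refine greedy_eq d x hd _ []
      ((PySem.List.sorted_ofList_pairwise_lt friends).imp le_of_lt) ?_ ?_ ?_ <;> simp
  simp only [hg]
  set rev := greedyRevB d x []
    (PySem.List.sorted (PySem.Set.ofList friends) (fun y => y) false) with hrev
  rw [List.length_reverse]
  by_cases h1 : (rev.length : Int) > k
  · rw [if_pos h1, if_pos h1]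
  · rw [if_neg h1, if_neg h1]
    have hfilter : ((PySem.List.pyRange x (-1) (-1)).filter
          (fun p => decide (p ∉ PySem.Set.ofList rev)))
        = ((PySem.List.pyRange x (-1) (-1)).filter (fun p => decide (p ∉ rev.reverse))) := by
      refine List.filter_congr ?_
      intro p _
      simp [PySem.Set.mem_ofList]
    by_cases h2 : (rev.length : Int) < k
    · rw [if_pos h2]
      have hpad := pad_eq rev.reverse (x + 1).toNat x [] (k - (rev.length : Int)) le_rfl
        (by simp)
      simp only [List.append_nil] at hpad
      rw [hpad, hfilter]
    · rw [if_neg h2]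
      have h0 : (k - (rev.length : Int)).toNat = 0 := by omega
      rw [h0]
      simp
lemma loop_eq (friends : List Int) (k x : Int) :
    ∀ (fuel : Nat) (lo hi : Int) (best : List Int), 0 ≤ lo → (hi + 1 - lo).toNat ≤ fuel →
      solveLoopA friends k x fuel lo hi best
        = bsB (PySem.List.sorted (PySem.Set.ofList friends) (fun y => y) false) k x lo hi best := by
  intro fuel
  induction fuel with
  | zero =>
    intro lo hi b _ hle
    rw [bsB, dif_pos (by omega)]
    rfl
  | succ m ih =>
    intro lo hi b hlo hle
    rw [bsB]
    simp only [solveLoopA]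
    by_cases h : lo ≤ hi
    · rw [if_pos h, dif_neg (by omega)]
      have hmid := PySem.Int.floordiv_two_mid_bounds h
      have h0 : (0 : Int) ≤ PySem.Int.floordiv (lo + hi) 2 := by omega
      rw [can_place_eq friends k x _ h0]
      cases hcov : coverB (PySem.List.sorted (PySem.Set.ofList friends) (fun y => y) false) k x
          (PySem.Int.floordiv (lo + hi) 2) with
      | none =>
        simp only [Bool.false_eq_true, if_false]
        exact ih lo _ b hlo (by omega)
      | some ts =>
        simp only [if_true]
        exact ih _ hi ts (by omega) (by omega)
    · rw [if_neg h, dif_pos (by omega)]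

-- ===== VERDICT (by name: the statement is the Claim_ definition above) =====
theorem solve_spec : Claim_equal_solve := by
  intro n k x friends _
  unfold Spec_solve solve solve_alt
  exact loop_eq friends k x (x + 1).toNat 0 x [] le_rfl (by omega)
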